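-- pv_equiv track=rewrite | github.com/CameronSelb/AdventOfCode_2024 | Day_4/part_2.py | move_diagonal_to_horizontal
-- ===== SOURCE A (Python) =====
-- def move_diagonal_to_horizontal(grid_to_transfor:list[str]) -> list[str]:
--     result = []
--     length = len(grid_to_transfor) - 1
--     col = length
--     row = 0
--
--     while col >= 0:
--         if type(grid_to_transfor[row][col]) is list:
--             line = []
--         else:
--             line = ''
--         while col <= length and row <= length:
--             if type(grid_to_transfor[row][col]) is list:
--                 line.append(grid_to_transfor[row][col])
--             else:
--                 line += grid_to_transfor[row][col]
--             row += 1
--             col += 1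
--
--         result.append(line)
--         col = length - row
--         row = 0
--
--     col = 0
--     row = 1
--     count = 0
--     while True:
--         count += 1
--         if count > length:
--             break
--
--         if type(grid_to_transfor[row][col]) is list:
--             line = []
--         else:
--             line = ''
--         while row <= length and col <= length:
--             if type(grid_to_transfor[row][col]) is list:
--                 line.append(grid_to_transfor[row][col])
--             else:
--                 line += grid_to_transfor[row][col]
--             row += 1
--             col += 1
--
--         result.append(line)
--         row = abs(row - length + count)
--         col = 0
--
--     return result
-- ===== SOURCE B (Python) =====
-- def move_diagonal_to_horizontal(grid_to_transfor: list[str]) -> list[str]: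
--     # Single row-major pass: scatter each cell into its diagonal bucket
--     # (bucket index n-1-(c-r)), instead of walking the diagonals one by one.
--     n = len(grid_to_transfor)
--     buckets = ['' for _ in range(2 * n - 1)] if n else []
--     for r, row_s in enumerate(grid_to_transfor):
--         for c in range(n):
--             buckets[n - 1 - c + r] += row_s[c]
--     return buckets
-- ===== Notes on version B (the rewrite author's own statement) =====
-- stated objective: alternative
-- what changed: A gathers each diagonal by walking (row,col) cursors diagonal-by-diagonal in two while-loop phases; B makes one row-major pass over the grid, scattering each cell into a pre-allocated bucket array indexed by its diagonal offset (n-1-(c-r)), and returns the buckets.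
import Mathlib
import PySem

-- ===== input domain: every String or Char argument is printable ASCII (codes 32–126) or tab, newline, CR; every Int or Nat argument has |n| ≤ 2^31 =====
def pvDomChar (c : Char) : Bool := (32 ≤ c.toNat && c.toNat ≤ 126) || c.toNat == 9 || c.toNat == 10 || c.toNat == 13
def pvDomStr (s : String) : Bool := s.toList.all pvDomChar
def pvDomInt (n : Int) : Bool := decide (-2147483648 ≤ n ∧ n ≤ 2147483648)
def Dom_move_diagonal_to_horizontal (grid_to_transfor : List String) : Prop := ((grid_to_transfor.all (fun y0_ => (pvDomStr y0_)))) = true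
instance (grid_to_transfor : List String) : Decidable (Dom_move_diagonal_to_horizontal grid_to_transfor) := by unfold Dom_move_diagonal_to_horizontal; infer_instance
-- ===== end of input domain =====

-- B replaces A's diagonal-walking two-phase while loops by a single row-major
-- pass scattering each cell into a pre-allocated bucket per diagonal
-- (alternative decomposition: gather per diagonal vs scatter per cell; same cost).
-- A's `type(...) is list` branches can never fire on a list[str] input, so both
-- sides build each line as a string of characters.

-- grid[r][c] for possibly out-of-range indices (Pre_ guarantees in-range; default ' ')
def pvCell (g : List String) (r c : Int) : Char :=
  ((PySem.Str.pyGet? ((PySem.List.pyGet? g r).getD "") c).getD ' ')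

-- row_s[c] (B reads the row string directly)
def pvChar (s : String) (c : Int) : Char := (PySem.Str.pyGet? s c).getD ' '

-- ===== PORT A =====
-- inner `while col <= length and row <= length` loop: returns (line, final row)
def pvInnerA (g : List String) (L : Int) (row col : Int) (line : List Char) :
    List Char × Int :=
  if _h : col ≤ L ∧ row ≤ L then
    pvInnerA g L (row + 1) (col + 1) (line ++ [pvCell g row col])
  else (line, row)
termination_by (L + 1 - row).toNat
decreasing_by omega

-- first phase: `while col >= 0` (row re-set to 0 each iteration); fuel merely makes it total
def pvOuter1 (g : List String) (L : Int) : Nat → Int → List String → List String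
  | 0, _, acc => acc
  | fuel + 1, col, acc =>
    if 0 ≤ col then
      let p := pvInnerA g L 0 col []
      pvOuter1 g L fuel (L - p.2) (acc ++ [String.ofList p.1])
    else acc

-- second phase: `while True` with count/break; fuel merely makes it total
def pvOuter2 (g : List String) (L : Int) : Nat → Int → Int → Int → List String → List String
  | 0, _, _, _, acc => acc
  | fuel + 1, col, row, count, acc =>
    let count := count + 1
    if L < count then acc
    else
      let p := pvInnerA g L row col []
      pvOuter2 g L fuel 0 |p.2 - L + count| count (acc ++ [String.ofList p.1])

def move_diagonal_to_horizontal (grid_to_transfor : List String) : List String :=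
  let L : Int := (grid_to_transfor.length : Int) - 1
  let r1 := pvOuter1 grid_to_transfor L (grid_to_transfor.length + 1) L []
  pvOuter2 grid_to_transfor L (grid_to_transfor.length + 1) 0 1 0 r1

-- ===== PORT B =====
-- `buckets[n-1-c+r] += row_s[c]` for one row r (the inner `for c in range(n)`);
-- the bucket index is always in range here, so the total pySetD/pyGetD forms are exact
def pvRowStep (n r : Int) (s : String) (bs : List String) : List String :=
  (PySem.List.pyRange 0 n 1).foldl
    (fun bs c =>
      PySem.List.pySetD bs (n - 1 - c + r)
        (PySem.List.pyGetD bs (n - 1 - c + r) "" ++ String.singleton (pvChar s c)))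
    bs

def move_diagonal_to_horizontal_alt (grid_to_transfor : List String) : List String :=
  let n : Int := (grid_to_transfor.length : Int)
  let buckets : List String :=
    if grid_to_transfor.length = 0 then [] else List.replicate (2 * grid_to_transfor.length - 1) ""
  (PySem.List.enumerate grid_to_transfor 0).foldl
    (fun bs rs => pvRowStep n rs.1 rs.2 bs) buckets

-- ===== PRECONDITION & SPEC =====
-- Pre_ excludes ragged grids whose first-n rows are shorter than the row count:
-- there Python A raises IndexError.
def Pre_move_diagonal_to_horizontal (grid_to_transfor : List String) : Prop :=
  ∀ s ∈ grid_to_transfor, grid_to_transfor.length ≤ s.toList.length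
instance (grid_to_transfor : List String) : Decidable (Pre_move_diagonal_to_horizontal grid_to_transfor) := by unfold Pre_move_diagonal_to_horizontal; infer_instance
def pvWitness_move_diagonal_to_horizontal : List String := ["ab", "cd"]

def Spec_move_diagonal_to_horizontal (grid_to_transfor : List String) (out : List String) : Prop := out = move_diagonal_to_horizontal_alt grid_to_transfor
instance (grid_to_transfor : List String) (out : List String) : Decidable (Spec_move_diagonal_to_horizontal grid_to_transfor out) := by unfold Spec_move_diagonal_to_horizontal; infer_instance

-- ===== CLAIM (what is proved, stated in full; the proofs are below) =====
def Claim_equal_move_diagonal_to_horizontal : Prop := ∀ (grid_to_transfor : List String), Dom_move_diagonal_to_horizontal grid_to_transfor → Pre_move_diagonal_to_horizontal grid_to_transfor → Spec_move_diagonal_to_horizontal grid_to_transfor (move_diagonal_to_horizontal grid_to_transfor)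

-- ===== LEMMAS AND PROOFS =====

-- characters along the diagonal of offset d (start row a = max 0 (-d), length n - |d|)
def pvDiag (g : List String) (d : Int) : String :=
  String.ofList ((List.range ((g.length : Int) - max d (-d)).toNat).map
    (fun i : Nat => pvCell g (max 0 (-d) + i) (max 0 (-d) + d + i)))

lemma pvInnerA_eq (g : List String) (L : Int) :
    ∀ (m : Nat) (row col : Int) (line : List Char),
      (col ≤ L ∧ row ≤ L → (m : Int) = L + 1 - max row col) →
      (¬(col ≤ L ∧ row ≤ L) → m = 0) →
      pvInnerA g L row col line =
        (line ++ (List.range m).map (fun i : Nat => pvCell g (row + i) (col + i)),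
         row + m) := by
  intro m
  induction m with
  | zero =>
    intro row col line h1 h2
    have hnot : ¬ (col ≤ L ∧ row ≤ L) := by
      intro h; have := h1 h; omega
    rw [pvInnerA, dif_neg hnot]
    simp
  | succ m ih =>
    intro row col line h1 h2
    have hboth : col ≤ L ∧ row ≤ L := by
      by_contra h; have := h2 h; omega
    have hm := h1 hboth
    have hmax : max (row + 1) (col + 1) = max row col + 1 := by omega
    rw [pvInnerA, dif_pos hboth]
    rw [ih (row + 1) (col + 1) (line ++ [pvCell g row col])
        (by intro h; rw [hmax]; push_cast at hm ⊢; omega)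
        (by intro h; push_cast at hm; omega)]
    simp only [Prod.mk.injEq]
    refine ⟨?_, by push_cast; omega⟩
    rw [List.range_succ_eq_map]
    simp only [List.map_cons, List.map_map, List.append_assoc, List.cons_append]
    congr 2
    · congr 1 <;> omega
    · apply List.map_congr_left
      intro i _
      congr 1 <;> push_cast <;> omega

lemma pvRange_neg_one_append (a m b : Int) (h1 : m ≤ a) (h2 : b ≤ m) :
    PySem.List.pyRange a b (-1) =
      PySem.List.pyRange a m (-1) ++ PySem.List.pyRange m b (-1) := by
  rw [PySem.List.pyRange_neg_one, PySem.List.pyRange_neg_one, PySem.List.pyRange_neg_one]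
  have hsplit : (a - b).toNat = (a - m).toNat + (m - b).toNat := by omega
  rw [hsplit, List.range_add, List.map_append, List.map_map]
  congr 1
  apply List.map_congr_left
  intro i hi
  simp only [Function.comp_apply]
  simp only [List.mem_range] at hi
  omega

lemma pvDiag_of_nonneg (g : List String) (L d : Int) (hL : L = (g.length : Int) - 1)
    (hd : 0 ≤ d) (hdL : d ≤ L) :
    pvDiag g d =
      String.ofList ((List.range (L + 1 - d).toNat).map
        (fun i : Nat => pvCell g (0 + i) (d + i))) := by
  unfold pvDiag
  have h1 : max d (-d) = d := by omega
  have h2 : max 0 (-d) = 0 := by omega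
  rw [h1, h2]
  have h3 : ((g.length : Int) - d).toNat = (L + 1 - d).toNat := by omega
  rw [h3]
  congr 1
  apply List.map_congr_left
  intro i _
  congr 1
  omega

lemma pvDiag_of_neg (g : List String) (L r : Int) (hL : L = (g.length : Int) - 1)
    (hr : 1 ≤ r) (hrL : r ≤ L) :
    pvDiag g (-r) =
      String.ofList ((List.range (L + 1 - r).toNat).map
        (fun i : Nat => pvCell g (r + i) (0 + i))) := by
  unfold pvDiag
  have h1 : max (-r) (-(-r)) = r := by omega
  have h2 : max 0 (-(-r)) = r := by omega
  rw [h1, h2]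
  have h3 : ((g.length : Int) - r).toNat = (L + 1 - r).toNat := by omega
  rw [h3]
  congr 1
  apply List.map_congr_left
  intro i _
  congr 1
  omega

lemma pvOuter1_eq (g : List String) (L : Int) (hL : L = (g.length : Int) - 1) :
    ∀ (fuel : Nat) (col : Int) (acc : List String),
      -1 ≤ col → col ≤ L → col < (fuel : Int) →
      pvOuter1 g L fuel col acc =
        acc ++ (PySem.List.pyRange col (-1) (-1)).map (pvDiag g) := by
  intro fuel
  induction fuel with
  | zero =>
    intro col acc h1 h2 h3
    have hc : col = -1 := by simp at h3; omega
    subst hc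
    rw [pvOuter1, PySem.List.pyRange_neg_one_eq_nil (by omega)]
    simp
  | succ fuel ih =>
    intro col acc h1 h2 h3
    rw [pvOuter1]
    by_cases hc : 0 ≤ col
    · rw [if_pos hc]
      have hkey := pvInnerA_eq g L (L + 1 - col).toNat 0 col []
        (by intro h; omega) (by intro h; omega)
      simp only [hkey]
      have harg : L - ((0 : Int) + ((L + 1 - col).toNat : Int)) = col - 1 := by omega
      rw [harg, ih (col - 1) _ (by omega) (by omega) (by push_cast at h3 ⊢; omega)]
      rw [PySem.List.pyRange_neg_one_cons (show (-1 : Int) < col by omega)]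
      rw [List.map_cons, List.append_assoc, List.singleton_append]
      congr 2
      rw [pvDiag_of_nonneg g L col hL hc h2]
      simp
    · rw [if_neg hc]
      have hc1 : col = -1 := by omega
      subst hc1
      rw [PySem.List.pyRange_neg_one_eq_nil (by omega)]
      simp

lemma pvOuter2_eq (g : List String) (L : Int) (hL : L = (g.length : Int) - 1) :
    ∀ (fuel : Nat) (count : Int) (acc : List String),
      0 ≤ count → L - count < (fuel : Int) →
      pvOuter2 g L fuel 0 (count + 1) count acc =
        acc ++ (PySem.List.pyRange (-(count + 1)) (-(L + 1)) (-1)).map (pvDiag g) := by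
  intro fuel
  induction fuel with
  | zero =>
    intro count acc h1 h2
    rw [pvOuter2, PySem.List.pyRange_neg_one_eq_nil (by simp at h2; omega)]
    simp
  | succ fuel ih =>
    intro count acc h1 h2
    rw [pvOuter2]
    by_cases hstop : L < count + 1
    · rw [if_pos hstop, PySem.List.pyRange_neg_one_eq_nil (by omega)]
      simp
    · rw [if_neg hstop]
      have hkey := pvInnerA_eq g L (L - count).toNat (count + 1) 0 []
        (by intro h; omega) (by intro h; omega)
      simp only [hkey]
      have habs : |((count + 1) + ((L - count).toNat : Int)) - L + (count + 1)| =
          (count + 1) + 1 := by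
        rw [abs_of_nonneg (by omega)]; omega
      rw [habs, ih (count + 1) _ (by omega) (by push_cast at h2 ⊢; omega)]
      rw [PySem.List.pyRange_neg_one_cons (show -(L + 1) < -(count + 1) by omega)]
      rw [show -(count + 1) - 1 = -(count + 1 + 1) from by ring]
      rw [List.map_cons, List.append_assoc, List.singleton_append]
      congr 2
      have hr : (L - count).toNat = (L + 1 - (count + 1)).toNat := by omega
      rw [pvDiag_of_neg g L (count + 1) hL (by omega) (by omega), ← hr]
      simp

-- ===== B-side lemmas =====

lemma pvRowStep_length (n r : Int) (s : String) (bs : List String) :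
    (pvRowStep n r s bs).length = bs.length := by
  unfold pvRowStep
  generalize PySem.List.pyRange 0 n 1 = cs
  induction cs generalizing bs with
  | nil => rfl
  | cons c cs ih => rw [List.foldl_cons, ih]; rw [PySem.List.length_pySetD]

-- contribution of rows k, k+1, … (the row strings in t) to bucket i
def pvSeg (N : Nat) (k : Nat) (t : List String) (i : Nat) : List Char :=
  match t with
  | [] => []
  | s :: t' =>
    (if k ≤ i ∧ i ≤ N - 1 + k then [pvChar s ((N : Int) - 1 + k - i)] else []) ++
      pvSeg N (k + 1) t' i

lemma pvRowStep_getD (N : Nat) (r : Nat) (hr : r < N) (s : String) :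
    ∀ (m : Nat), m ≤ N → ∀ (bs : List String), bs.length = 2 * N - 1 → ∀ (i : Nat),
      PySem.List.pyGetD
        (((List.range m).map (fun c : Nat => (c : Int))).foldl
          (fun bs c =>
            PySem.List.pySetD bs ((N : Int) - 1 - c + r)
              (PySem.List.pyGetD bs ((N : Int) - 1 - c + r) "" ++ String.singleton (pvChar s c)))
          bs) (i : Int) "" =
        if r ≤ i ∧ N - 1 + r < i + m ∧ i ≤ N - 1 + r then
          PySem.List.pyGetD bs (i : Int) "" ++ String.singleton (pvChar s ((N : Int) - 1 + r - i))
        else PySem.List.pyGetD bs (i : Int) "" := by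
  intro m
  induction m with
  | zero =>
    intro _ bs _ i
    rw [if_neg (by omega)]
    rfl
  | succ m ih =>
    intro hm bs hbs i
    rw [List.range_succ, List.map_append, List.foldl_append]
    simp only [List.map_cons, List.map_nil, List.foldl_cons, List.foldl_nil]
    set Fm := ((List.range m).map (fun c : Nat => (c : Int))).foldl
      (fun bs c => PySem.List.pySetD bs ((N : Int) - 1 - c + r)
        (PySem.List.pyGetD bs ((N : Int) - 1 - c + r) "" ++ String.singleton (pvChar s c))) bs
      with hFm
    have hFmlen : Fm.length = 2 * N - 1 := by
      rw [hFm]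
      clear hFm
      generalize (List.range m).map (fun c : Nat => (c : Int)) = cs
      induction cs generalizing bs with
      | nil => exact hbs
      | cons c cs ihc =>
        rw [List.foldl_cons, ihc _ (by rw [PySem.List.length_pySetD]; exact hbs)]
    have hjn : ((N : Int) - 1 - (m : Int) + (r : Int)) = ((N - 1 - m + r : Nat) : Int) := by
      push_cast; omega
    set jn : Nat := N - 1 - m + r with hjndef
    have hjnlt : jn < Fm.length := by rw [hFmlen]; omega
    rw [hjn]
    rw [PySem.List.pyGetD_pySetD_natCast Fm jn i _ _ hjnlt]
    by_cases hij : i = jn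
    · rw [if_pos hij, hij]
      rw [ih (by omega) bs hbs jn]
      rw [if_neg (by omega), if_pos (by omega)]
      have hchar : ((N : Int) - 1 + (r : Int) - (jn : Int)) = (m : Int) := by
        omega
      rw [hchar]
    · rw [if_neg hij]
      rw [ih (by omega) bs hbs i]
      by_cases hc : r ≤ i ∧ N - 1 + r < i + m ∧ i ≤ N - 1 + r
      · rw [if_pos hc, if_pos (by omega)]
      · rw [if_neg hc, if_neg (by omega)]

lemma pvRowsFold_getD (N : Nat) :
    ∀ (t : List String) (k : Nat), k + t.length ≤ N →
    ∀ (bs : List String), bs.length = 2 * N - 1 → ∀ (i : Nat),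
      PySem.List.pyGetD
        ((PySem.List.enumerate t (k : Int)).foldl
          (fun bs rs => pvRowStep (N : Int) rs.1 rs.2 bs) bs) (i : Int) "" =
        PySem.List.pyGetD bs (i : Int) "" ++ String.ofList (pvSeg N k t i) := by
  intro t
  induction t with
  | nil =>
    intro k _ bs _ i
    rw [PySem.List.enumerate_nil, List.foldl_nil]
    show PySem.List.pyGetD bs (i : Int) "" =
      PySem.List.pyGetD bs (i : Int) "" ++ String.ofList []
    rw [String.ofList_nil, String.append_empty]
  | cons s t' ih =>
    intro k hk bs hbs i
    rw [PySem.List.enumerate_cons, List.foldl_cons]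
    have hk1 : ((k : Int) + 1) = ((k + 1 : Nat) : Int) := by push_cast; ring
    rw [hk1, ih (k + 1) (by simp at hk ⊢; omega) _
      (by rw [pvRowStep_length]; exact hbs) i]
    have hstep : PySem.List.pyGetD (pvRowStep (N : Int) (k : Int) s bs) (i : Int) "" =
        if k ≤ i ∧ i ≤ N - 1 + k then
          PySem.List.pyGetD bs (i : Int) "" ++ String.singleton (pvChar s ((N : Int) - 1 + k - i))
        else PySem.List.pyGetD bs (i : Int) "" := by
      have hkN : k < N := by simp at hk; omega
      have := pvRowStep_getD N k hkN s N (le_refl N) bs hbs i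
      rw [pvRowStep, PySem.List.pyRange_zero_nat]
      rw [this]
      by_cases hc : k ≤ i ∧ i ≤ N - 1 + k
      · rw [if_pos (by omega), if_pos hc]
      · rw [if_neg (by omega), if_neg hc]
    rw [hstep]
    show _ = PySem.List.pyGetD bs (i : Int) "" ++ String.ofList
      ((if k ≤ i ∧ i ≤ N - 1 + k then [pvChar s ((N : Int) - 1 + k - i)] else []) ++
        pvSeg N (k + 1) t' i)
    by_cases hc : k ≤ i ∧ i ≤ N - 1 + k
    · rw [if_pos hc, if_pos hc]
      rw [String.append_assoc]
      congr 1
      apply String.ext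
      simp [String.singleton]
    · rw [if_neg hc, if_neg hc, List.nil_append]

-- interval filterMap over a range collapses to a map
lemma pvFilterMap_range_interval {α : Type} (h : Nat → α) (a cnt : Nat) :
    ∀ n, a + cnt ≤ n →
      (List.range n).filterMap
        (fun j => if a ≤ j ∧ j < a + cnt then some (h j) else none) =
      (List.range cnt).map (fun j => h (a + j)) := by
  intro n hn
  have hdecomp : n = (a + cnt) + (n - (a + cnt)) := by omega
  rw [hdecomp, List.range_add, List.range_add, List.filterMap_append, List.filterMap_append,
    List.filterMap_map, List.filterMap_map]
  have h1 : (List.range a).filterMap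
      (fun j => if a ≤ j ∧ j < a + cnt then some (h j) else none) = [] := by
    apply List.filterMap_eq_nil_iff.2
    intro j hj
    simp only [List.mem_range] at hj
    rw [if_neg (by omega)]
  have h3 : (List.range (n - (a + cnt))).filterMap
      ((fun j => if a ≤ j ∧ j < a + cnt then some (h j) else none) ∘ (a + cnt + ·)) = [] := by
    apply List.filterMap_eq_nil_iff.2
    intro j _
    simp only [Function.comp_apply]
    rw [if_neg (by omega)]
  rw [h1, h3, List.nil_append, List.append_nil]
  rw [List.filterMap_eq_map_iff_forall_eq_some.2 ?_]
  intro j hj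
  simp only [List.mem_range] at hj
  simp only [Function.comp_apply]
  rw [if_pos (by omega)]

set_option maxHeartbeats 4000000 in
lemma pvSeg_eq_pvDiag (g : List String) (i : Nat) (hi : i < 2 * g.length - 1) :
    String.ofList (pvSeg g.length 0 g i) = pvDiag g ((g.length : Int) - 1 - i) := by
  have hfm : ∀ (t : List String) (k : Nat),
      pvSeg g.length k t i =
        (List.range t.length).filterMap (fun j =>
          if k + j ≤ i ∧ i ≤ g.length - 1 + (k + j) then
            some (pvChar (t.getD j "") ((g.length : Int) - 1 + ((k : Int) + (j : Int)) - i)) else none) := by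
    intro t
    induction t with
    | nil => intro k; rfl
    | cons s t' ih =>
      intro k
      show (if k ≤ i ∧ i ≤ g.length - 1 + k then
          [pvChar s ((g.length : Int) - 1 + (k : Int) - i)] else []) ++
          pvSeg g.length (k + 1) t' i = _
      rw [List.length_cons, List.range_succ_eq_map]
      have hfun : ((fun j : Nat =>
          if k + j ≤ i ∧ i ≤ g.length - 1 + (k + j) then
            some (pvChar ((s :: t').getD j "") ((g.length : Int) - 1 + ((k : Int) + (j : Int)) - i))
          else none) ∘ Nat.succ) = (fun j : Nat =>
          if (k + 1) + j ≤ i ∧ i ≤ g.length - 1 + ((k + 1) + j) then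
            some (pvChar (t'.getD j "") ((g.length : Int) - 1 + (((k + 1 : Nat) : Int) + (j : Int)) - i))
          else none) := by
        funext j
        simp only [Function.comp_apply, Nat.succ_eq_add_one, List.getD_cons_succ]
        by_cases hj : (k + 1) + j ≤ i ∧ i ≤ g.length - 1 + ((k + 1) + j)
        · rw [if_pos (by omega), if_pos hj]
          congr 2
          push_cast
          ring
        · rw [if_neg (by omega), if_neg hj]
      by_cases hc : k ≤ i ∧ i ≤ g.length - 1 + k
      · rw [List.filterMap_cons_some
          (b := pvChar s ((g.length : Int) - 1 + ((k : Int) + ((0 : Nat) : Int)) - i))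
          (by simp only [List.getD_cons_zero]
              rw [if_pos (show k + 0 ≤ i ∧ i ≤ g.length - 1 + (k + 0) from by omega)])]
        rw [List.filterMap_map, hfun, ← ih (k + 1)]
        rw [if_pos hc, List.singleton_append]
        have hcast : ((g.length : Int) - 1 + ((k : Int) + (((0 : Nat)) : Int)) - i) =
            ((g.length : Int) - 1 + (k : Int) - i) := by push_cast; ring
        simp only [hcast]
      · rw [List.filterMap_cons_none
          (by simp only [List.getD_cons_zero]
              rw [if_neg (show ¬(k + 0 ≤ i ∧ i ≤ g.length - 1 + (k + 0)) from by omega)])]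
        rw [List.filterMap_map, hfun, ← ih (k + 1)]
        rw [if_neg hc, List.nil_append]
  rw [hfm g 0]
  simp only [Nat.cast_zero, zero_add]
  have hN1 : 1 ≤ g.length := by omega
  set N := g.length with hN
  set a : Nat := i + 1 - N with ha
  set cnt : Nat := min (i + 1) N - a with hcnt
  have hcongr : (List.range N).filterMap (fun j =>
      if j ≤ i ∧ i ≤ N - 1 + j then
        some (pvChar (g.getD j "") ((N : Int) - 1 + (j : Int) - i)) else none) =
      (List.range N).filterMap (fun j =>
      if a ≤ j ∧ j < a + cnt then
        some (pvChar (g.getD j "") ((N : Int) - 1 + (j : Int) - i)) else none) := by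
    apply List.filterMap_congr
    intro j hj
    simp only [List.mem_range] at hj
    by_cases hc : a ≤ j ∧ j < a + cnt
    · rw [if_pos (by omega), if_pos hc]
    · rw [if_neg (by omega), if_neg hc]
  rw [hcongr, pvFilterMap_range_interval _ a cnt N (by omega)]
  unfold pvDiag
  rw [← hN]
  congr 1
  have hlen : ((N : Int) - max ((N : Int) - 1 - i) (-((N : Int) - 1 - i))).toNat = cnt := by
    omega
  rw [hlen]
  apply List.map_congr_left
  intro j hj
  simp only [List.mem_range] at hj
  have hrow : max (0 : Int) (-((N : Int) - 1 - i)) + (j : Int) = ((a + j : Nat) : Int) := by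
    push_cast; omega
  have hcol : max (0 : Int) (-((N : Int) - 1 - i)) + ((N : Int) - 1 - i) + (j : Int) =
      (N : Int) - 1 + ((a + j : Nat) : Int) - i := by
    push_cast; omega
  rw [pvCell, hrow, hcol]
  have hlt : a + j < g.length := by omega
  have hgd : g.getD (a + j) "" = g[a + j] := by
    rw [List.getD_eq_getElem?_getD, List.getElem?_eq_getElem hlt]
    rfl
  rw [PySem.List.pyGet?_natCast g (a + j), List.getElem?_eq_getElem hlt]
  simp only [Option.getD_some]
  rw [pvChar, hgd]

lemma pvAltB_eq (g : List String) :
    move_diagonal_to_horizontal_alt g =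
      (PySem.List.pyRange ((g.length : Int) - 1) (-(g.length : Int)) (-1)).map (pvDiag g) := by
  by_cases hg : g.length = 0
  · rw [List.length_eq_zero_iff.mp hg]
    decide
  · have hfoldlen : ∀ (t : List String) (k : Int) (bs : List String),
        ((PySem.List.enumerate t k).foldl
          (fun bs rs => pvRowStep ((g.length : Int)) rs.1 rs.2 bs) bs).length = bs.length := by
      intro t
      induction t with
      | nil => intro k bs; rw [PySem.List.enumerate_nil, List.foldl_nil]
      | cons s t' ih =>
        intro k bs
        rw [PySem.List.enumerate_cons, List.foldl_cons, ih, pvRowStep_length]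
    unfold move_diagonal_to_horizontal_alt
    rw [if_neg hg]
    refine List.ext_getElem ?_ ?_
    · rw [hfoldlen, List.length_replicate, PySem.List.pyRange_neg_one, List.length_map,
        List.length_map, List.length_range]
      omega
    · intro i h1 h2
      have h2N : i < 2 * g.length - 1 := by
        rw [hfoldlen, List.length_replicate] at h1
        exact h1
      have hkey := pvRowsFold_getD g.length g 0 (by omega)
        (List.replicate (2 * g.length - 1) "") (by rw [List.length_replicate]) i
      simp only [Nat.cast_zero] at hkey
      have hgetL :
          ((PySem.List.enumerate g 0).foldl
            (fun bs rs => pvRowStep ((g.length : Int)) rs.1 rs.2 bs)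
            (List.replicate (2 * g.length - 1) ""))[i]'h1 =
          PySem.List.pyGetD
            ((PySem.List.enumerate g 0).foldl
              (fun bs rs => pvRowStep ((g.length : Int)) rs.1 rs.2 bs)
              (List.replicate (2 * g.length - 1) "")) (i : Int) "" := by
        rw [PySem.List.pyGetD_eq_getElem _ "" (Int.natCast_nonneg i) (by
          rw [hfoldlen, List.length_replicate]
          exact_mod_cast h2N)]
        simp
      rw [hgetL, hkey]
      have hrepl : PySem.List.pyGetD (List.replicate (2 * g.length - 1) ("" : String)) (i : Int) "" = "" := by
        rw [PySem.List.pyGetD_eq_getElem _ "" (Int.natCast_nonneg i) (by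
          rw [List.length_replicate]
          exact_mod_cast h2N)]
        simp
      rw [hrepl]
      have hR : ((PySem.List.pyRange ((g.length : Int) - 1) (-(g.length : Int)) (-1)).map
          (pvDiag g))[i]'h2 = pvDiag g ((g.length : Int) - 1 - i) := by
        simp [PySem.List.pyRange_neg_one]
      rw [hR, ← pvSeg_eq_pvDiag g i h2N]
      apply String.ext
      simp

-- ===== VERDICT (by name: the statement is the Claim_ definition above) =====
theorem move_diagonal_to_horizontal_spec : Claim_equal_move_diagonal_to_horizontal := by
  intro g _ _
  unfold Spec_move_diagonal_to_horizontal
  cases g with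
  | nil => decide
  | cons s gs =>
    rw [pvAltB_eq]
    show pvOuter2 (s :: gs) (((s :: gs).length : Int) - 1) ((s :: gs).length + 1) 0 1 0
        (pvOuter1 (s :: gs) (((s :: gs).length : Int) - 1) ((s :: gs).length + 1)
          (((s :: gs).length : Int) - 1) []) =
      List.map (pvDiag (s :: gs)) (PySem.List.pyRange (((s :: gs).length : Int) - 1)
        (-((s :: gs).length : Int)) (-1))
    have hn : 1 ≤ ((s :: gs).length : Int) := by simp
    rw [pvOuter1_eq (s :: gs) _ rfl ((s :: gs).length + 1) (((s :: gs).length : Int) - 1) []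
      (by omega) (by omega) (by push_cast; omega)]
    rw [List.nil_append]
    have h2 := pvOuter2_eq (s :: gs) (((s :: gs).length : Int) - 1) rfl ((s :: gs).length + 1) 0
      ((PySem.List.pyRange (((s :: gs).length : Int) - 1) (-1) (-1)).map (pvDiag (s :: gs)))
      (by omega) (by push_cast; omega)
    simp only [zero_add, sub_add_cancel] at h2
    rw [h2]
    rw [pvRange_neg_one_append (((s :: gs).length : Int) - 1) (-1)
      (-((s :: gs).length : Int)) (by omega) (by omega), List.map_append]
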